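-- pv_equiv track=rewrite | github.com/mcmendenhall/content-system | scrape Google SERPS for kewyord topic.py | split_text_by_headings
-- ===== SOURCE A (Python) =====
-- def split_text_by_headings(text, headings):
--     sections = []
--     lower_text = text.lower()
--     last_index = 0
--
--     for heading in headings:
--         h_lower = heading.lower()
--         index = lower_text.find(h_lower)
--         if index != -1 and index > last_index:
--             content = text[last_index:index].strip()
--             if sections and content:
--                 sections[-1]['content'] = content
--             sections.append({"heading": heading, "content": ""})
--             last_index = index + len(h_lower)
--
--     if sections:
--         remainder = text[last_index:].strip()
--         if remainder:
--             sections[-1]['content'] = remainder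
--     else:
--         sections = [{"heading": "Body", "content": text.strip()}]
--
--     return sections
-- ===== SOURCE B (Python) =====
-- def split_text_by_headings(text, headings):
--     # Pass 1: boundary detection only -- same acceptance test as before,
--     # but we just record (heading, start, end) spans.
--     lower_text = text.lower()
--     spans = []
--     last = 0
--     for heading in headings:
--         index = lower_text.find(heading.lower())
--         if index != -1 and index > last:
--             last = index + len(heading.lower())
--             spans.append((heading, index, last))
--     if not spans:
--         return [{"heading": "Body", "content": text.strip()}]
--     # Pass 2: content extraction by slicing between consecutive boundaries.
--     sections = []
--     for (heading, _, end), nxt in zip(spans, spans[1:] + [None]):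
--         stop = nxt[1] if nxt is not None else None
--         sections.append({"heading": heading, "content": text[end:stop].strip()})
--     return sections
-- ===== Notes on version B (the rewrite author's own statement) =====
-- stated objective: simpler
-- what changed: B separates boundary detection from content extraction: a first pass collects accepted (heading, start, end) spans, a second pass builds each section by slicing the text between consecutive boundaries, instead of A's single pass that retro-actively mutates the previous section's dict.
import Mathlib
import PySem

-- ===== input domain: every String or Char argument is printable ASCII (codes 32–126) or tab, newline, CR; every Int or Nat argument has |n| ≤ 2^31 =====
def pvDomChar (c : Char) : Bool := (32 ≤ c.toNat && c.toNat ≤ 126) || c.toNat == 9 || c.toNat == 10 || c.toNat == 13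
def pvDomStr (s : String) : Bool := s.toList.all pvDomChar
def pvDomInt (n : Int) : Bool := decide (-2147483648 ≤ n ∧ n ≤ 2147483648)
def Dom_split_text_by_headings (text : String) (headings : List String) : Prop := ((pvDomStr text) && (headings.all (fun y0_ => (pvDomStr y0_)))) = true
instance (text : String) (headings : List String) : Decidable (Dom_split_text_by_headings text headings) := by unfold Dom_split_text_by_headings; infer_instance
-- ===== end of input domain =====

-- B separates boundary detection from content extraction (two passes over spans)
-- instead of A's single pass that retro-actively mutates the previous section's dict; same cost.

-- ===== PORT A =====
-- sections[-1]['content'] = c : dict __setitem__ on the last section (overwrite in place, via PySem.Dict)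
def pvSetLast (sections : List (List (String × String))) (c : String) : List (List (String × String)) :=
  match sections.getLast? with
  | none => sections
  | some d => sections.dropLast ++ [(PySem.Dict.insert (PySem.Dict.mk d) "content" c).items]

def pvStepA (text lowerText : String) (acc : List (List (String × String)) × Int) (heading : String) :
    List (List (String × String)) × Int :=
  let hLower := PySem.Str.lower heading
  let index := PySem.Str.find lowerText hLower
  if index ≠ -1 ∧ acc.2 < index then
    let content := PySem.Str.strip (PySem.Str.slice text (some acc.2) (some index))
    let sections := if acc.1 ≠ [] ∧ content ≠ "" then pvSetLast acc.1 content else acc.1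
    (sections ++ [[("heading", heading), ("content", "")]], index + PySem.Str.len hLower)
  else acc

def split_text_by_headings (text : String) (headings : List String) : List (List (String × String)) :=
  let lowerText := PySem.Str.lower text
  let st := headings.foldl (pvStepA text lowerText) ([], 0)
  if st.1 ≠ [] then
    let remainder := PySem.Str.strip (PySem.Str.slice text (some st.2) none)
    if remainder ≠ "" then pvSetLast st.1 remainder else st.1
  else [[("heading", "Body"), ("content", PySem.Str.strip text)]]

-- ===== PORT B =====
-- pass 1: collect accepted (heading, start, end) spans
def pvStepB (lowerText : String) (acc : List (String × Int × Int) × Int) (heading : String) :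
    List (String × Int × Int) × Int :=
  let index := PySem.Str.find lowerText (PySem.Str.lower heading)
  if index ≠ -1 ∧ acc.2 < index then
    let last := index + PySem.Str.len (PySem.Str.lower heading)
    (acc.1 ++ [(heading, index, last)], last)
  else acc

-- pass 2: one section per span, content = slice of text up to the next span's start
def pvBuild (text : String) : List (String × Int × Int) → List (List (String × String))
  | [] => []
  | (h, _, e) :: rest =>
    let stop : Option Int := match rest with | [] => none | (_, s2, _) :: _ => some s2
    [("heading", h), ("content", PySem.Str.strip (PySem.Str.slice text (some e) stop))] :: pvBuild text rest

def split_text_by_headings_alt (text : String) (headings : List String) : List (List (String × String)) :=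
  let lowerText := PySem.Str.lower text
  let spans := (headings.foldl (pvStepB lowerText) ([], 0)).1
  if spans = [] then [[("heading", "Body"), ("content", PySem.Str.strip text)]]
  else pvBuild text spans

-- ===== PRECONDITION & SPEC =====
def Spec_split_text_by_headings (text : String) (headings : List String) (out : List (List (String × String))) : Prop := out = split_text_by_headings_alt text headings
instance (text : String) (headings : List String) (out : List (List (String × String))) : Decidable (Spec_split_text_by_headings text headings out) := by unfold Spec_split_text_by_headings; infer_instance

-- ===== CLAIM (what is proved, stated in full; the proofs are below) =====
def Claim_equal_split_text_by_headings : Prop := ∀ (text : String) (headings : List String), Dom_split_text_by_headings text headings → Spec_split_text_by_headings text headings (split_text_by_headings text headings)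

-- ===== LEMMAS AND PROOFS =====

-- end-index of the last accepted span (A's last_index after the loop)
def pvLastEnd (sp : List (String × Int × Int)) : Int := ((sp.getLast?).map (fun x => x.2.2)).getD 0

-- A's sections list during the loop, as a function of the accepted spans:
-- every section but the last carries the slice up to the next span's start; the last still carries "".
def pvRP (text : String) : List (String × Int × Int) → List (List (String × String))
  | [] => []
  | (h, _, e) :: rest =>
    (match rest with
     | [] => [("heading", h), ("content", "")]
     | (_, s2, _) :: _ => [("heading", h), ("content", PySem.Str.strip (PySem.Str.slice text (some e) (some s2)))]) :: pvRP text rest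

theorem pvRP_single (text h : String) (s e : Int) :
    pvRP text [(h, s, e)] = [[("heading", h), ("content", "")]] := rfl

theorem pvRP_cons_cons (text h1 h2 : String) (s1 e1 s2 e2 : Int) (rest : List (String × Int × Int)) :
    pvRP text ((h1, s1, e1) :: (h2, s2, e2) :: rest)
      = [("heading", h1), ("content", PySem.Str.strip (PySem.Str.slice text (some e1) (some s2)))]
          :: pvRP text ((h2, s2, e2) :: rest) := rfl

theorem pvBuild_single (text h : String) (s e : Int) :
    pvBuild text [(h, s, e)]
      = [[("heading", h), ("content", PySem.Str.strip (PySem.Str.slice text (some e) none))]] := rfl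

theorem pvBuild_cons_cons (text h1 h2 : String) (s1 e1 s2 e2 : Int) (rest : List (String × Int × Int)) :
    pvBuild text ((h1, s1, e1) :: (h2, s2, e2) :: rest)
      = [("heading", h1), ("content", PySem.Str.strip (PySem.Str.slice text (some e1) (some s2)))]
          :: pvBuild text ((h2, s2, e2) :: rest) := rfl

theorem pvLastEnd_single (h : String) (s e : Int) : pvLastEnd [(h, s, e)] = e := rfl

theorem pvLastEnd_cons_cons (y z : String × Int × Int) (rest : List (String × Int × Int)) :
    pvLastEnd (y :: z :: rest) = pvLastEnd (z :: rest) := by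
  simp [pvLastEnd]

theorem pvLastEnd_append (sp : List (String × Int × Int)) (x : String × Int × Int) :
    pvLastEnd (sp ++ [x]) = x.2.2 := by
  simp [pvLastEnd]

theorem pvRP_ne_nil (text : String) (sp : List (String × Int × Int)) (h : sp ≠ []) :
    pvRP text sp ≠ [] := by
  cases sp with
  | nil => exact absurd rfl h
  | cons x t => obtain ⟨a, s, e⟩ := x; simp [pvRP]

theorem pvSetLast_cons (d : List (String × String)) (tl : List (List (String × String)))
    (c : String) (h : tl ≠ []) : pvSetLast (d :: tl) c = d :: pvSetLast tl c := by
  unfold pvSetLast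
  have h1 : (d :: tl).getLast? = tl.getLast? := by
    cases tl with
    | nil => exact absurd rfl h
    | cons a t => simp [List.getLast?_cons_cons]
  rw [h1, List.dropLast_cons_of_ne_nil h]
  cases htl : tl.getLast? with
  | none => exact absurd (List.getLast?_eq_none_iff.mp htl) h
  | some d' => simp

theorem pvInsertContent (hd c : String) :
    (PySem.Dict.insert (PySem.Dict.mk ([("heading", hd), ("content", "")] : List (String × String))) "content" c).items
      = [("heading", hd), ("content", c)] := by
  simp [PySem.Dict.insert, PySem.Dict.contains]

-- pushing one new accepted span through A's "fix previous section, append fresh one" step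
theorem pvRP_append (text : String) (sp : List (String × Int × Int)) (h : String) (i e : Int) :
    pvRP text (sp ++ [(h, i, e)]) =
      (let c := PySem.Str.strip (PySem.Str.slice text (some (pvLastEnd sp)) (some i))
       if pvRP text sp ≠ [] ∧ c ≠ "" then pvSetLast (pvRP text sp) c else pvRP text sp)
        ++ [[("heading", h), ("content", "")]] := by
  induction sp with
  | nil => simp [pvRP]
  | cons y rest ih =>
    obtain ⟨h1, s1, e1⟩ := y
    cases rest with
    | nil =>
      simp only [List.cons_append, List.nil_append, pvRP_cons_cons, pvRP_single, pvLastEnd_single, pvRP]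
      by_cases hc : PySem.Str.strip (PySem.Str.slice text (some e1) (some i)) = ""
      · simp [hc]
      · simp [hc, pvSetLast, pvInsertContent]
    | cons z rest' =>
      obtain ⟨h2, s2, e2⟩ := z
      have hne : pvRP text ((h2, s2, e2) :: rest') ≠ [] := pvRP_ne_nil text _ (by simp)
      rw [List.cons_append, List.cons_append, pvRP_cons_cons, ← List.cons_append, ih,
        pvLastEnd_cons_cons, pvRP_cons_cons]
      set c := PySem.Str.strip (PySem.Str.slice text (some (pvLastEnd ((h2, s2, e2) :: rest'))) (some i)) with hcdef
      by_cases hc : c = ""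
      · simp [hc]
      · simp only [hne, hc, ne_eq, not_false_iff, and_true, if_true, reduceCtorEq, if_pos]
        rw [pvSetLast_cons _ _ _ hne]
        simp

-- loop invariant: A's fold state is (pvRP of B's spans, B's last index), and that index is the last span's end
theorem pvLoop (text lowerText : String) (hs : List String) :
    ∀ (sp : List (String × Int × Int)) (l : Int), l = pvLastEnd sp →
      hs.foldl (pvStepA text lowerText) (pvRP text sp, l)
        = (pvRP text (hs.foldl (pvStepB lowerText) (sp, l)).1, (hs.foldl (pvStepB lowerText) (sp, l)).2)
      ∧ (hs.foldl (pvStepB lowerText) (sp, l)).2 = pvLastEnd (hs.foldl (pvStepB lowerText) (sp, l)).1 := by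
  induction hs with
  | nil => intro sp l hl; exact ⟨rfl, hl⟩
  | cons h t ih =>
    intro sp l hl
    subst hl
    simp only [List.foldl_cons]
    by_cases hg : PySem.Str.find lowerText (PySem.Str.lower h) ≠ -1 ∧
        pvLastEnd sp < PySem.Str.find lowerText (PySem.Str.lower h)
    · have hB : pvStepB lowerText (sp, pvLastEnd sp) h
          = (sp ++ [(h, PySem.Str.find lowerText (PySem.Str.lower h),
              PySem.Str.find lowerText (PySem.Str.lower h) + PySem.Str.len (PySem.Str.lower h))],
             PySem.Str.find lowerText (PySem.Str.lower h) + PySem.Str.len (PySem.Str.lower h)) := by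
        dsimp only [pvStepB]
        rw [if_pos hg]
      have hA : pvStepA text lowerText (pvRP text sp, pvLastEnd sp) h
          = (pvRP text (sp ++ [(h, PySem.Str.find lowerText (PySem.Str.lower h),
              PySem.Str.find lowerText (PySem.Str.lower h) + PySem.Str.len (PySem.Str.lower h))]),
             PySem.Str.find lowerText (PySem.Str.lower h) + PySem.Str.len (PySem.Str.lower h)) := by
        dsimp only [pvStepA]
        rw [if_pos hg, pvRP_append]
      rw [hA, hB]
      exact ih _ _ (by rw [pvLastEnd_append])
    · have hB : pvStepB lowerText (sp, pvLastEnd sp) h = (sp, pvLastEnd sp) := by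
        dsimp only [pvStepB]
        rw [if_neg hg]
      have hA : pvStepA text lowerText (pvRP text sp, pvLastEnd sp) h = (pvRP text sp, pvLastEnd sp) := by
        dsimp only [pvStepA]
        rw [if_neg hg]
      rw [hA, hB]
      exact ih _ _ rfl

-- finishing step: A's remainder-fix of pvRP equals B's pvBuild
theorem pvFinish (text : String) (sp : List (String × Int × Int)) (h : sp ≠ []) :
    (let r := PySem.Str.strip (PySem.Str.slice text (some (pvLastEnd sp)) none)
     if r ≠ "" then pvSetLast (pvRP text sp) r else pvRP text sp) = pvBuild text sp := by
  induction sp with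
  | nil => exact absurd rfl h
  | cons y rest ih =>
    obtain ⟨h1, s1, e1⟩ := y
    cases rest with
    | nil =>
      simp only [pvRP_single, pvLastEnd_single, pvBuild_single]
      by_cases hr : PySem.Str.strip (PySem.Str.slice text (some e1) none) = ""
      · simp [hr]
      · simp [hr, pvSetLast, pvInsertContent]
    | cons z rest' =>
      obtain ⟨h2, s2, e2⟩ := z
      have hne : pvRP text ((h2, s2, e2) :: rest') ≠ [] := pvRP_ne_nil text _ (by simp)
      rw [pvBuild_cons_cons, ← ih (by simp), pvLastEnd_cons_cons, pvRP_cons_cons]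
      set r := PySem.Str.strip (PySem.Str.slice text (some (pvLastEnd ((h2, s2, e2) :: rest'))) none) with hrdef
      by_cases hr : r = ""
      · simp [hr]
      · simp only [hr, ne_eq, not_false_iff, if_true]
        rw [pvSetLast_cons _ _ _ hne]

-- ===== VERDICT (by name: the statement is the Claim_ definition above) =====
theorem split_text_by_headings_spec : Claim_equal_split_text_by_headings := by
  intro text headings _
  unfold Spec_split_text_by_headings
  simp only [split_text_by_headings, split_text_by_headings_alt]
  have h0 : (0 : Int) = pvLastEnd [] := rfl
  obtain ⟨hfold, hlast⟩ := pvLoop text (PySem.Str.lower text) headings [] 0 h0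
  set rr := headings.foldl (pvStepB (PySem.Str.lower text)) ([], 0) with hr
  have hA : headings.foldl (pvStepA text (PySem.Str.lower text)) ([], 0) = (pvRP text rr.1, rr.2) := by
    simpa [pvRP] using hfold
  rw [hA]
  by_cases hsp : rr.1 = []
  · simp [hsp, pvRP]
  · have hne := pvRP_ne_nil text rr.1 hsp
    simp only [hne, hsp, ne_eq, not_false_iff, if_pos, if_neg]
    rw [← pvFinish text rr.1 hsp, hlast]
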